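-- pv_equiv track=rewrite | github.com/AugustDanell/Kattis-Assignments | Python/tetris.py | tri_piece
-- ===== SOURCE A (Python) =====
-- def tri_piece(top_row):
--     fits = 0
--     for i in range(len(top_row)):
--         # Rotation one the identity, T
--         if(i + 2 < len(top_row)):
--             if(top_row[i] - 1 == top_row[i+1] and top_row[i] == top_row[i+2]):
--                 fits += 1
--
--         # 90 degree rotated T (counterclockwise)
--         if(i + 1 < len(top_row)):
--             if(top_row[i] - 1 == top_row[i+1]):
--                 fits += 1
--
--         # 180 degree rotated T (Upside down aka horizontal flip)
--         if(i + 2 < len(top_row)):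
--             if(top_row[i] == top_row[i+1] == top_row[i+2]):
--                 fits += 1
--
--         # 90 degree rotated T (clockwise)
--         if(i + 1 < len(top_row)):
--             if(top_row[i] + 1 == top_row[i+1]):
--                 fits += 1
--
--     return fits
-- ===== SOURCE B (Python) =====
-- def tri_piece(top_row):
--     # Run-length encode the skyline into (height, width) plateaus, then count
--     # T placements per plateau and per plateau boundary.
--     runs = []
--     i = 0
--     n = len(top_row)
--     while i < n:
--         h = top_row[i]
--         j = i + 1
--         while j < n and top_row[j] == h:
--             j += 1
--         runs.append((h, j - i))
--         i = j
--     flats = sum(w - 2 for (h, w) in runs if w > 2)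
--     steps = sum(1 for ((h1, w1), (h2, w2)) in zip(runs, runs[1:]) if abs(h2 - h1) == 1)
--     notches = sum(1 for ((h1, w1), (h2, w2), (h3, w3)) in zip(runs, runs[1:], runs[2:])
--                   if w2 == 1 and h1 == h2 + 1 and h3 == h2 + 1)
--     return flats + steps + notches
-- ===== Notes on version B (the rewrite author's own statement) =====
-- stated objective: alternative
-- what changed: B run-length encodes the skyline into (height, width) plateau runs and counts placements per plateau (width-2 flats), per run boundary (unit steps) and per width-1 notch between runs, instead of A's four guarded raw-index window tests at every cell.
import Mathlib
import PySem

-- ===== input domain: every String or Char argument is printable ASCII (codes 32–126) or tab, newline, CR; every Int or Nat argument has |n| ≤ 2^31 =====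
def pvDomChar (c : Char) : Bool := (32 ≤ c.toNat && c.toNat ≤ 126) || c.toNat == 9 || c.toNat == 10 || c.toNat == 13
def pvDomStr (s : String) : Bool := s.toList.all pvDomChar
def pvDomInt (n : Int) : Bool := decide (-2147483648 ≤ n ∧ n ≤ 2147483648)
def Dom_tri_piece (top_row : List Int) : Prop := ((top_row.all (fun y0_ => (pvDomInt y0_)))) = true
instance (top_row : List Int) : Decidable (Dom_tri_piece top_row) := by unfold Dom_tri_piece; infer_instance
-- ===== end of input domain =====

-- B run-length encodes the skyline into (height, width) plateaus and counts T placements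
-- per plateau and per plateau boundary, instead of A's four window tests per raw index (alternative).

-- ===== PORT A =====
-- loop body of A, one name per Python branch, in source order
def tri_pieceStep (top_row : List Int) (fits : Int) (i : Nat) : Int :=
  -- Rotation one the identity, T
  let f1 := if i + 2 < top_row.length then
      (if top_row.getD i 0 - 1 = top_row.getD (i+1) 0 ∧ top_row.getD i 0 = top_row.getD (i+2) 0
       then fits + 1 else fits)
    else fits
  -- 90 degree rotated T (counterclockwise)
  let f2 := if i + 1 < top_row.length then
      (if top_row.getD i 0 - 1 = top_row.getD (i+1) 0 then f1 + 1 else f1)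
    else f1
  -- 180 degree rotated T (upside down)
  let f3 := if i + 2 < top_row.length then
      (if top_row.getD i 0 = top_row.getD (i+1) 0 ∧ top_row.getD (i+1) 0 = top_row.getD (i+2) 0
       then f2 + 1 else f2)
    else f2
  -- 90 degree rotated T (clockwise)
  if i + 1 < top_row.length then
      (if top_row.getD i 0 + 1 = top_row.getD (i+1) 0 then f3 + 1 else f3)
    else f3

def tri_piece (top_row : List Int) : Int :=
  (List.range top_row.length).foldl (tri_pieceStep top_row) 0

-- ===== PORT B =====
-- inner while loop of Source B: how many further cells continue the current plateau
def pvRunLen (h : Int) : List Int → Nat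
  | [] => 0
  | x :: t => if x = h then 1 + pvRunLen h t else 0

-- outer while loop of Source B: run-length encoding into (height, width) plateaus
def pvRle : List Int → List (Int × Int)
  | [] => []
  | h :: t => (h, (1 : Int) + (pvRunLen h t : Int)) :: pvRle (t.drop (pvRunLen h t))
  termination_by xs => xs.length
  decreasing_by simp [List.length_drop]

def tri_piece_alt (top_row : List Int) : Int :=
  let runs := pvRle top_row
  let flats := (runs.map (fun r => if r.2 > 2 then r.2 - 2 else 0)).sum
  let steps : Int := ((runs.zip runs.tail).filter
      (fun p => (p.2.1 - p.1.1).natAbs == 1)).length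
  let notches : Int := ((runs.zip (runs.tail.zip runs.tail.tail)).filter
      (fun p => p.2.1.2 == 1 && p.1.1 == p.2.1.1 + 1 && p.2.2.1 == p.2.1.1 + 1)).length
  flats + steps + notches

-- ===== PRECONDITION & SPEC =====
def Spec_tri_piece (top_row : List Int) (out : Int) : Prop := out = tri_piece_alt top_row
instance (top_row : List Int) (out : Int) : Decidable (Spec_tri_piece top_row out) := by unfold Spec_tri_piece; infer_instance

-- ===== CLAIM (what is proved, stated in full; the proofs are below) =====
def Claim_equal_tri_piece : Prop := ∀ (top_row : List Int), Dom_tri_piece top_row → Spec_tri_piece top_row (tri_piece top_row)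

-- ===== LEMMAS AND PROOFS =====

/-- Per-index contribution of A's loop body. -/
def triC (xs : List Int) (i : Nat) : Int :=
    (if i + 2 < xs.length ∧ xs.getD i 0 - 1 = xs.getD (i+1) 0 ∧ xs.getD i 0 = xs.getD (i+2) 0 then 1 else 0)
  + (if i + 1 < xs.length ∧ xs.getD i 0 - 1 = xs.getD (i+1) 0 then 1 else 0)
  + (if i + 2 < xs.length ∧ xs.getD i 0 = xs.getD (i+1) 0 ∧ xs.getD (i+1) 0 = xs.getD (i+2) 0 then 1 else 0)
  + (if i + 1 < xs.length ∧ xs.getD i 0 + 1 = xs.getD (i+1) 0 then 1 else 0)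

/-- Windowed recursion: reference form of the count. -/
def triW : List Int → Int
  | [] => 0
  | [_] => 0
  | [a, b] => (if a - 1 = b then 1 else 0) + (if a + 1 = b then 1 else 0)
  | a :: b :: c :: rest =>
      (if a - 1 = b ∧ a = c then 1 else 0) + (if a - 1 = b then 1 else 0)
    + (if a = b ∧ b = c then 1 else 0) + (if a + 1 = b then 1 else 0)
    + triW (b :: c :: rest)

theorem tri_pieceStep_eq (xs : List Int) (fits : Int) (i : Nat) :
    tri_pieceStep xs fits i = fits + triC xs i := by
  simp only [tri_pieceStep, triC]
  split_ifs <;> omega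

theorem tri_piece_eq_sum (xs : List Int) :
    tri_piece xs = ((List.range xs.length).map (triC xs)).sum := by
  have hf : tri_pieceStep xs = fun fits i => fits + triC xs i := by
    funext fits i; exact tri_pieceStep_eq xs fits i
  rw [tri_piece, hf, PySem.List.foldl_add, zero_add]

theorem triC_cons (a : Int) (rest : List Int) (i : Nat) :
    triC (a :: rest) (i + 1) = triC rest i := by
  simp [triC]
  split_ifs <;> omega

theorem sum_triC_eq_triW (xs : List Int) :
    ((List.range xs.length).map (triC xs)).sum = triW xs := by
  induction xs using triW.induct with
  | case1 => simp [triW]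
  | case2 a => simp [triW, triC, List.range_succ]
  | case3 a b =>
      simp [triW, triC, List.range_succ]
  | case4 a b c rest ih =>
      have hlen : (a :: b :: c :: rest).length = (b :: c :: rest).length + 1 := rfl
      rw [hlen, List.range_succ_eq_map, List.map_cons, List.map_map, List.sum_cons]
      have hmap : (List.range (b :: c :: rest).length).map (triC (a :: b :: c :: rest) ∘ Nat.succ)
          = (List.range (b :: c :: rest).length).map (triC (b :: c :: rest)) := by
        apply List.map_congr_left
        intro i _
        exact triC_cons a (b :: c :: rest) i
      rw [hmap, ih, triW]
      have h0 : triC (a :: b :: c :: rest) 0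
          = (if a - 1 = b ∧ a = c then 1 else 0) + (if a - 1 = b then 1 else 0)
          + (if a = b ∧ b = c then 1 else 0) + (if a + 1 = b then 1 else 0) := by
        simp [triC]
      rw [h0]

/-- Flat-plateau contribution. -/
def flatC (w : Int) : Int := if w > 2 then w - 2 else 0
/-- Boundary (unit step) contribution. -/
def stepC (h1 h2 : Int) : Int := if (h2 - h1).natAbs = 1 then 1 else 0
/-- Width-1 notch contribution. -/
def notchC (h1 h2 w2 h3 : Int) : Int := if w2 = 1 ∧ h1 = h2 + 1 ∧ h3 = h2 + 1 then 1 else 0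

/-- Recursive form of B's three sums over the run list. -/
def countRuns : List (Int × Int) → Int
  | [] => 0
  | [(_, w)] => flatC w
  | [(h1, w1), (h2, w2)] => flatC w1 + stepC h1 h2 + countRuns [(h2, w2)]
  | (h1, w1) :: (h2, w2) :: (h3, w3) :: rs =>
      flatC w1 + stepC h1 h2 + notchC h1 h2 w2 h3 + countRuns ((h2, w2) :: (h3, w3) :: rs)

theorem alt_eq_countRuns (runs : List (Int × Int)) :
    (runs.map (fun r => if r.2 > 2 then r.2 - 2 else 0)).sum
      + (((runs.zip runs.tail).filter
          (fun p => (p.2.1 - p.1.1).natAbs == 1)).length : Int)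
      + (((runs.zip (runs.tail.zip runs.tail.tail)).filter
          (fun p => p.2.1.2 == 1 && p.1.1 == p.2.1.1 + 1 && p.2.2.1 == p.2.1.1 + 1)).length : Int)
      = countRuns runs := by
  induction runs using countRuns.induct with
  | case1 => simp [countRuns]
  | case2 h w => simp [countRuns, flatC]
  | case3 h1 w1 h2 w2 =>
      simp only [countRuns, flatC, stepC, List.tail_cons, List.zip_cons_cons,
        List.zip_nil_right, List.map_cons, List.map_nil, List.sum_cons,
        List.sum_nil, List.filter_cons, List.filter_nil, beq_iff_eq]
      split_ifs <;> (try simp) <;> omega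
  | case4 h1 w1 h2 w2 h3 w3 rs ih =>
      simp only [List.tail_cons, List.zip_cons_cons, List.map_cons, List.sum_cons,
        List.filter_cons, beq_iff_eq, Bool.and_eq_true] at ih ⊢
      rw [countRuns, ← ih]
      simp only [flatC, stepC, notchC]
      split_ifs <;> (try simp only [List.length_cons]) <;> push_cast <;> omega

theorem tri_piece_alt_eq (xs : List Int) : tri_piece_alt xs = countRuns (pvRle xs) := by
  rw [tri_piece_alt]
  exact alt_eq_countRuns (pvRle xs)

theorem pvRle_nil : pvRle [] = [] := by rw [pvRle]

theorem pvRle_cons (h : Int) (t : List Int) :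
    pvRle (h :: t) = (h, (1 : Int) + (pvRunLen h t : Int)) :: pvRle (t.drop (pvRunLen h t)) := by
  rw [pvRle]


theorem pvRunLen_cons (h x : Int) (t : List Int) :
    pvRunLen h (x :: t) = if x = h then 1 + pvRunLen h t else 0 := rfl

/-- Bumping the first plateau's width by one adds 1 exactly when it was already ≥ 2. -/
theorem countRuns_bump (h w : Int) (rs : List (Int × Int)) (hw : 1 ≤ w) :
    countRuns ((h, w + 1) :: rs) = countRuns ((h, w) :: rs) + (if 2 ≤ w then 1 else 0) := by
  match rs with
  | [] => simp only [countRuns, flatC]; split_ifs <;> omega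
  | [(h2, w2)] => simp only [countRuns, flatC]; split_ifs <;> omega
  | (h2, w2) :: (h3, w3) :: rs' => simp only [countRuns, flatC]; split_ifs <;> omega

/-- Prepending a width-1 plateau in front of a plateau of width ≠ 1 adds only the step term. -/
theorem countRuns_cons_one_ne (a b w2 : Int) (rs : List (Int × Int)) (hw : w2 ≠ 1) :
    countRuns ((a, 1) :: (b, w2) :: rs) = stepC a b + countRuns ((b, w2) :: rs) := by
  match rs with
  | [] => simp only [countRuns, flatC]; split_ifs <;> omega
  | (h3, w3) :: rs' =>
      simp only [countRuns, flatC, notchC]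
      split_ifs <;> omega

theorem countRuns_rle_eq_triW (xs : List Int) : countRuns (pvRle xs) = triW xs := by
  induction xs using triW.induct with
  | case1 => simp [pvRle_nil, countRuns, triW]
  | case2 a => rw [pvRle_cons]; simp [pvRunLen, pvRle_nil, countRuns, triW, flatC]
  | case3 a b =>
      rw [pvRle_cons]
      by_cases hab : b = a
      · subst hab
        simp [pvRunLen, pvRle_nil, countRuns, triW, flatC]
      · rw [pvRunLen_cons, if_neg hab]
        simp only [Nat.cast_zero, add_zero, List.drop_zero]
        rw [pvRle_cons]
        simp only [pvRunLen, Nat.cast_zero, List.drop_nil, pvRle_nil]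
        simp only [countRuns, flatC, stepC, triW]
        split_ifs <;> omega
  | case4 a b c rest ih =>
      rw [triW, pvRle_cons]
      by_cases hab : b = a
      · subst hab
        rw [pvRunLen_cons, if_pos rfl]
        have hdrop : (b :: c :: rest).drop (1 + pvRunLen b (c :: rest))
            = (c :: rest).drop (pvRunLen b (c :: rest)) := by
          simp [Nat.add_comm]
        rw [hdrop]
        have hcast : (1 : Int) + ((1 + pvRunLen b (c :: rest) : Nat) : Int)
            = ((1 : Int) + (pvRunLen b (c :: rest) : Int)) + 1 := by push_cast; ring
        rw [hcast, countRuns_bump _ _ _ (by omega)]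
        rw [← pvRle_cons, ih]
        have hk : pvRunLen b (c :: rest) = if c = b then 1 + pvRunLen b rest else 0 := rfl
        rw [hk]
        by_cases hbc : c = b
        · rw [if_pos hbc]
          split_ifs <;> omega
        · rw [if_neg hbc]
          split_ifs <;> omega
      · rw [pvRunLen_cons, if_neg hab]
        simp only [Nat.cast_zero, add_zero, List.drop_zero]
        rw [pvRle_cons]
        by_cases hcb : c = b
        · have hk : pvRunLen b (c :: rest) = 1 + pvRunLen b rest := by
            rw [pvRunLen_cons, if_pos hcb]
          rw [countRuns_cons_one_ne _ _ _ _ (by rw [hk]; push_cast; omega)]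
          rw [← pvRle_cons, ih]
          simp only [stepC]
          split_ifs <;> omega
        · have hk : pvRunLen b (c :: rest) = 0 := by
            rw [pvRunLen_cons, if_neg hcb]
          rw [hk]
          simp only [Nat.cast_zero, add_zero, List.drop_zero]
          rw [pvRle_cons]
          rw [countRuns]
          rw [← pvRle_cons]
          have hfold : pvRle (b :: c :: rest) = (b, 1) :: pvRle (c :: rest) := by
            rw [pvRle_cons, hk]; norm_num
          rw [← hfold, ih]
          simp only [flatC, stepC, notchC, true_and]
          split_ifs <;> omega

theorem tri_piece_alt_eq_triW (xs : List Int) : tri_piece_alt xs = triW xs := by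
  rw [tri_piece_alt_eq, countRuns_rle_eq_triW]

-- ===== VERDICT (by name: the statement is the Claim_ definition above) =====
theorem tri_piece_spec : Claim_equal_tri_piece := by
  intro xs _
  show tri_piece xs = tri_piece_alt xs
  rw [tri_piece_eq_sum, sum_triC_eq_triW, tri_piece_alt_eq_triW]
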